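-- pv_equiv track=rewrite | github.com/spenpal/advent-of-code | 2021/day22/day22.py | part2
-- ===== SOURCE A (Python) =====
-- import math
--
-- def oppState(state):
--     return 'off' if state == 'on' else 'on'
--
-- def intersection(c1, c2):
--
--     def plane_intersection(r1, r2):
--         i = (max(r1[0], r2[0]), min(r1[-1], r2[-1]))
--         return i if i[0] <= i[1] else ()
--
--     inter = tuple(plane_intersection(r1, r2) for r1, r2 in zip(c1, c2))
--     return inter if all(r for r in inter) else None
--
-- def total_cubes(core):
--     return math.prod(r[1] - r[0] + 1 for r in core)
--
-- def part2(steps):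
--     """
--     Read Reddit solution on Set Theory to do this one
--     """
--     reactor = []
--
--     for cuboid_state, cuboid in steps:
--         new_cores = [(cuboid_state, cuboid)] if cuboid_state == 'on' else []
--
--         for core_state, core in reactor:
--             if (inter := intersection(cuboid, core)):
--                 new_cores.append((oppState(core_state), inter))
--
--         reactor.extend(new_cores)
--
--     return sum((1 if state == 'on' else -1) * total_cubes(core) for state, core in reactor)
-- ===== SOURCE B (Python) =====
-- def part2(steps):
--     # Recursive top-down formulation: each 'on' step contributes the volume of its
--     # cuboid counted with inclusion-exclusion against all LATER step cuboids,
--     # computed by structural recursion instead of A's growing signed-reactor list.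
--
--     def plane(r1, r2):
--         lo, hi = max(r1[0], r2[0]), min(r1[-1], r2[-1])
--         return (lo, hi) if lo <= hi else None
--
--     def isect(c1, c2):
--         out = []
--         for r1, r2 in zip(c1, c2):
--             p = plane(r1, r2)
--             if p is None:
--                 return None
--             out.append(p)
--         return out if out else None
--
--     def vol(cub):
--         v = 1
--         for lo, hi in cub:
--             v *= hi - lo + 1
--         return v
--
--     def uncovered(cub, later):
--         # inclusion-exclusion count of cub against the cuboids of 'later':
--         # uncovered against rest, minus the doubly counted part lying in later[0]
--         if not later:
--             return vol(cub)
--         rest = later[1:]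
--         total = uncovered(cub, rest)
--         i = isect(later[0][1], cub)
--         if i is not None:
--             total -= uncovered(i, rest)
--         return total
--
--     return sum(uncovered(cub, steps[j + 1:])
--                for j, (state, cub) in enumerate(steps) if state == 'on')
-- ===== Notes on version B (the rewrite author's own statement) =====
-- stated objective: alternative
-- what changed: B drops A's growing global list of signed state-flipped cuboids entirely: it computes, by structural recursion over the tail of the step list, each 'on' cuboid's inclusion-exclusion volume against the later cuboids only, and sums those per-step contributions.
import Mathlib
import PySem

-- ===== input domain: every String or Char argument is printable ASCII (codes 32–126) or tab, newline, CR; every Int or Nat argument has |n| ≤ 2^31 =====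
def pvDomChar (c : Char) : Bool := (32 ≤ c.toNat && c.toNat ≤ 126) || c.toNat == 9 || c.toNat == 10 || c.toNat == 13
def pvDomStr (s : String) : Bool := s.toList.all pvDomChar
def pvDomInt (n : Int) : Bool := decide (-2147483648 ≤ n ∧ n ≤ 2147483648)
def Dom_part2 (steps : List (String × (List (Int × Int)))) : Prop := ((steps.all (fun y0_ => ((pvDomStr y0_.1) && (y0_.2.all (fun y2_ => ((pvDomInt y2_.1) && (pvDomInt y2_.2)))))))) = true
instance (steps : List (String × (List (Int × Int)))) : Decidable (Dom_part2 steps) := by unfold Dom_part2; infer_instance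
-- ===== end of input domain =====

-- B replaces A's growing global list of signed, state-flipped cuboids by a structural
-- recursion: each 'on' step contributes its cuboid's inclusion-exclusion volume against
-- the LATER step cuboids only (an alternative decomposition; no speed claim).

-- ===== PORT A =====
def oppState (state : String) : String :=
  if state == "on" then "off" else "on"

-- Python's plane_intersection returns () for an empty intersection; modelled as none
def planeIntersection (r1 r2 : Int × Int) : Option (Int × Int) :=
  let i := (max r1.1 r2.1, min r1.2 r2.2)
  if i.1 ≤ i.2 then some i else none

-- the Python tuple with possible () components is the List Option; 'all(r for r in inter)'
-- is the isSome test, and the returned tuple (all components truthy) is the filterMap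
def intersection (c1 c2 : List (Int × Int)) : Option (List (Int × Int)) :=
  let inter := (c1.zip c2).map fun p => planeIntersection p.1 p.2
  if inter.all Option.isSome then some (inter.filterMap id) else none

def totalCubes (core : List (Int × Int)) : Int :=
  (core.map fun r => r.2 - r.1 + 1).prod

def part2 (steps : List (String × (List (Int × Int)))) : Int :=
  let reactor := steps.foldl (fun reactor step =>
    let newCores :=
      (if step.1 == "on" then [(step.1, step.2)] else []) ++
      reactor.foldl (fun acc c =>
        match intersection step.2 c.2 with
        | some inter => if inter.isEmpty then acc else acc ++ [(oppState c.1, inter)]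
        | none => acc) []
    reactor ++ newCores) ([] : List (String × List (Int × Int)))
  (reactor.map fun c => (if c.1 == "on" then (1 : Int) else -1) * totalCubes c.2).sum

-- ===== PORT B =====
def planeB (r1 r2 : Int × Int) : Option (Int × Int) :=
  let lo := max r1.1 r2.1
  let hi := min r1.2 r2.2
  if lo ≤ hi then some (lo, hi) else none

-- B's isect loop with its early 'return None'; 'out if out else None' is the isEmpty test
def isectGo : List ((Int × Int) × (Int × Int)) → Option (List (Int × Int))
  | [] => some []
  | p :: ps =>
    match planeB p.1 p.2 with
    | none => none
    | some q => (isectGo ps).map (q :: ·)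

def isectB (c1 c2 : List (Int × Int)) : Option (List (Int × Int)) :=
  match isectGo (c1.zip c2) with
  | none => none
  | some out => if out.isEmpty then none else some out

def volB (cub : List (Int × Int)) : Int :=
  cub.foldl (fun v r => v * (r.2 - r.1 + 1)) 1

def uncovered (cub : List (Int × Int)) : List (String × List (Int × Int)) → Int
  | [] => volB cub
  | s :: rest =>
    let total := uncovered cub rest
    match isectB s.2 cub with
    | some i => total - uncovered i rest
    | none => total

-- steps[j+1:] with j ≥ 0 is List.drop (j+1) (PySem.List.slice_from_natCast)
def part2_alt (steps : List (String × (List (Int × Int)))) : Int :=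
  (((PySem.List.enumerate steps).filter fun je => je.2.1 == "on").map
      fun je => uncovered je.2.2 (steps.drop (je.1.toNat + 1))).sum

-- ===== PRECONDITION & SPEC =====
def Spec_part2 (steps : List (String × (List (Int × Int)))) (out : Int) : Prop := out = part2_alt steps
instance (steps : List (String × (List (Int × Int)))) (out : Int) : Decidable (Spec_part2 steps out) := by unfold Spec_part2; infer_instance

-- ===== CLAIM (what is proved, stated in full; the proofs are below) =====
def Claim_equal_part2 : Prop := ∀ (steps : List (String × (List (Int × Int)))), Dom_part2 steps → Spec_part2 steps (part2 steps)

-- ===== LEMMAS AND PROOFS =====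

-- sign of a reactor state string
def pvSign (s : String) : Int := if s == "on" then 1 else -1

-- the truthy intersection A's guard computes (named form of isectB for the proof)
def pvIk (cub core : List (Int × Int)) : Option (List (Int × Int)) :=
  let l := (cub.zip core).map fun p => (max p.1.1 p.2.1, min p.1.2 p.2.2)
  if !l.isEmpty && l.all (fun r => decide (r.1 ≤ r.2)) then some l else none

-- A's one outer-loop step
def pvStepA (R : List (String × List (Int × Int))) (st : String) (cub : List (Int × Int)) :
    List (String × List (Int × Int)) :=
  R ++ ((if st == "on" then [(st, cub)] else []) ++
    R.filterMap (fun c => (pvIk cub c.2).map fun l => (oppState c.1, l)))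

-- B's recursive sum over the remaining steps
def pvAltRec : List (String × List (Int × Int)) → Int
  | [] => 0
  | (st, c) :: L => (if st == "on" then uncovered c L else 0) + pvAltRec L

lemma pvAll_eq (zs : List ((Int × Int) × (Int × Int))) :
    (zs.map fun p => planeIntersection p.1 p.2).all Option.isSome
      = (zs.map fun p => (max p.1.1 p.2.1, min p.1.2 p.2.2)).all (fun r => decide (r.1 ≤ r.2)) := by
  induction zs with
  | nil => rfl
  | cons p zs ih =>
    simp only [List.map_cons, List.all_cons]
    by_cases h : max p.1.1 p.2.1 ≤ min p.1.2 p.2.2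
    · have hpi : planeIntersection p.1 p.2 = some (max p.1.1 p.2.1, min p.1.2 p.2.2) := by
        simp [planeIntersection, h]
      rw [hpi, ih, decide_eq_true h]; simp
    · have hpi : planeIntersection p.1 p.2 = none := by
        simp [planeIntersection, h]
      rw [hpi, decide_eq_false h]; simp

lemma pvFilterMap_eq (zs : List ((Int × Int) × (Int × Int)))
    (h : (zs.map fun p => planeIntersection p.1 p.2).all Option.isSome = true) :
    (zs.map fun p => planeIntersection p.1 p.2).filterMap id
      = zs.map fun p => (max p.1.1 p.2.1, min p.1.2 p.2.2) := by
  induction zs with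
  | nil => rfl
  | cons p zs ih =>
    simp only [List.map_cons, List.all_cons, Bool.and_eq_true] at h
    rcases h with ⟨h1, h2⟩
    have hle : max p.1.1 p.2.1 ≤ min p.1.2 p.2.2 := by
      by_contra hc; simp [planeIntersection, hc] at h1
    have hpi : planeIntersection p.1 p.2 = some (max p.1.1 p.2.1, min p.1.2 p.2.2) := by
      simp [planeIntersection, hle]
    simp only [List.map_cons, List.filterMap_cons, hpi, id_eq]
    exact congrArg _ (ih h2)

-- A's truthy intersection is pvIk
lemma pvIk_eq_intersection (cub core : List (Int × Int)) :
    pvIk cub core =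
      (match intersection cub core with
       | some inter => if inter.isEmpty then none else some inter
       | none => none) := by
  unfold pvIk intersection
  by_cases hall : ((cub.zip core).map fun p => planeIntersection p.1 p.2).all Option.isSome
  · rw [if_pos hall, pvFilterMap_eq _ hall]
    have hleq : ((cub.zip core).map fun p => (max p.1.1 p.2.1, min p.1.2 p.2.2)).all
        (fun r => decide (r.1 ≤ r.2)) = true := by rw [← pvAll_eq]; exact hall
    by_cases hemp : ((cub.zip core).map fun p => (max p.1.1 p.2.1, min p.1.2 p.2.2)).isEmpty
    · simp [hemp, hleq]
    · simp [hemp, hleq]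
  · rw [if_neg hall]
    have hleq : ((cub.zip core).map fun p => (max p.1.1 p.2.1, min p.1.2 p.2.2)).all
        (fun r => decide (r.1 ≤ r.2)) = false := by
      rw [← pvAll_eq]; exact Bool.not_eq_true _ ▸ eq_false_of_ne_true hall
    simp [hleq]

-- B's truthy intersection is pvIk too
lemma pvIsectGo_some (zs : List ((Int × Int) × (Int × Int)))
    (h : (zs.map fun p => (max p.1.1 p.2.1, min p.1.2 p.2.2)).all (fun r => decide (r.1 ≤ r.2)) = true) :
    isectGo zs = some (zs.map fun p => (max p.1.1 p.2.1, min p.1.2 p.2.2)) := by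
  induction zs with
  | nil => rfl
  | cons p zs ih =>
    simp only [List.map_cons, List.all_cons, Bool.and_eq_true, decide_eq_true_eq] at h
    rcases h with ⟨h1, h2⟩
    simp only [isectGo, planeB, if_pos h1, ih h2, Option.map_some, List.map_cons]

lemma pvIsectGo_none (zs : List ((Int × Int) × (Int × Int)))
    (h : (zs.map fun p => (max p.1.1 p.2.1, min p.1.2 p.2.2)).all (fun r => decide (r.1 ≤ r.2)) = false) :
    isectGo zs = none := by
  induction zs with
  | nil => simp at h
  | cons p zs ih =>
    simp only [List.map_cons, List.all_cons] at h
    by_cases h1 : max p.1.1 p.2.1 ≤ min p.1.2 p.2.2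
    · have h2 := h
      rw [decide_eq_true h1, Bool.true_and] at h2
      simp only [isectGo, planeB, if_pos h1, ih h2, Option.map_none]
    · simp only [isectGo, planeB, if_neg h1]

lemma pvIsectB_eq_pvIk (c1 c2 : List (Int × Int)) : isectB c1 c2 = pvIk c1 c2 := by
  unfold isectB pvIk
  by_cases hall : ((c1.zip c2).map fun p => (max p.1.1 p.2.1, min p.1.2 p.2.2)).all
      (fun r => decide (r.1 ≤ r.2))
  · rw [pvIsectGo_some _ hall]
    by_cases hemp : ((c1.zip c2).map fun p => (max p.1.1 p.2.1, min p.1.2 p.2.2)).isEmpty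
    · simp [hemp, hall]
    · simp [hemp, hall]
  · rw [pvIsectGo_none _ (Bool.not_eq_true _ ▸ eq_false_of_ne_true hall)]
    simp [eq_false_of_ne_true hall]

-- unfolding uncovered through pvIk
lemma pvUncovered_cons (cub : List (Int × Int)) (s : String × List (Int × Int))
    (L : List (String × List (Int × Int))) :
    uncovered cub (s :: L) =
      uncovered cub L -
        (match pvIk s.2 cub with
         | some i => uncovered i L
         | none => 0) := by
  show (let total := uncovered cub L
        match isectB s.2 cub with
        | some i => total - uncovered i L
        | none => total) = _
  rw [pvIsectB_eq_pvIk]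
  rcases pvIk s.2 cub with _ | i <;> simp

-- A's inner loop body, through pvIk
lemma pvBodyA (cub : List (Int × Int)) (c : String × List (Int × Int))
    (acc : List (String × List (Int × Int))) :
    (match intersection cub c.2 with
     | some inter => if inter.isEmpty then acc else acc ++ [(oppState c.1, inter)]
     | none => acc) =
    (match pvIk cub c.2 with
     | some l => acc ++ [(oppState c.1, l)]
     | none => acc) := by
  rw [pvIk_eq_intersection]
  rcases intersection cub c.2 with _ | i
  · rfl
  · by_cases h : i.isEmpty <;> simp [h]

-- generic: append-on-some loop is filterMap
lemma pvFoldl_append_opt {α β : Type} (g : α → Option β) (l : List α) (acc : List β) :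
    l.foldl (fun acc x => match g x with | some y => acc ++ [y] | none => acc) acc
      = acc ++ l.filterMap g := by
  induction l generalizing acc with
  | nil => simp
  | cons x xs ih =>
    rcases hg : g x with _ | y <;> simp [List.foldl_cons, hg, ih]

-- one step of A's outer loop is pvStepA
lemma pvFoldA_eq (R : List (String × List (Int × Int))) (step : String × List (Int × Int)) :
    (let newCores :=
      (if step.1 == "on" then [(step.1, step.2)] else []) ++
      R.foldl (fun acc c =>
        match intersection step.2 c.2 with
        | some inter => if inter.isEmpty then acc else acc ++ [(oppState c.1, inter)]
        | none => acc) []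
     R ++ newCores) = pvStepA R step.1 step.2 := by
  show R ++ _ = _
  have h1 : R.foldl (fun acc c =>
      match intersection step.2 c.2 with
      | some inter => if inter.isEmpty then acc else acc ++ [(oppState c.1, inter)]
      | none => acc) []
      = R.filterMap (fun c => (pvIk step.2 c.2).map fun l => (oppState c.1, l)) := by
    have := pvFoldl_append_opt (fun c => (pvIk step.2 c.2).map fun l => (oppState c.1, l)) R []
    simp only [List.nil_append] at this
    rw [← this]
    apply PySem.List.foldl_congr_mem
    intro acc c _
    rw [pvBodyA]
    rcases pvIk step.2 c.2 with _ | l <;> rfl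
  rw [h1]; rfl

lemma pvSign_opp (s : String) : pvSign (oppState s) = -pvSign s := by
  by_cases h : s == "on" <;> simp [oppState, pvSign, h]

lemma pvVolB_eq (core : List (Int × Int)) : volB core = totalCubes core := by
  rw [volB, totalCubes, List.prod_eq_foldl, List.foldl_map]

-- the weighted sum over the flipped-intersection entries
lemma pvFlips_sum (cub : List (Int × Int)) (R : List (String × List (Int × Int)))
    (L : List (String × List (Int × Int))) :
    ((R.filterMap (fun c => (pvIk cub c.2).map fun l => (oppState c.1, l))).map
        fun e => pvSign e.1 * uncovered e.2 L).sum
      = (R.map fun e => pvSign e.1 *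
          -(match pvIk cub e.2 with | some i => uncovered i L | none => 0)).sum := by
  induction R with
  | nil => simp
  | cons e R ih =>
    simp only [List.filterMap_cons, List.map_cons, List.sum_cons]
    rcases hik : pvIk cub e.2 with _ | j
    · simpa [hik] using ih
    · simp only [Option.map_some, List.map_cons, List.sum_cons, ih, pvSign_opp]
      ring

-- MAIN INVARIANT: running A's loop from reactor R over steps L gives B's sum plus
-- the uncovered-weighted contribution of the entries already in R
lemma pvMain (L : List (String × List (Int × Int))) :
    ∀ R : List (String × List (Int × Int)),
      ((L.foldl (fun reactor step =>
          let newCores :=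
            (if step.1 == "on" then [(step.1, step.2)] else []) ++
            reactor.foldl (fun acc c =>
              match intersection step.2 c.2 with
              | some inter => if inter.isEmpty then acc else acc ++ [(oppState c.1, inter)]
              | none => acc) []
          reactor ++ newCores) R).map
          fun c => (if c.1 == "on" then (1 : Int) else -1) * totalCubes c.2).sum
        = (R.map fun e => pvSign e.1 * uncovered e.2 L).sum + pvAltRec L := by
  induction L with
  | nil =>
    intro R
    simp only [List.foldl_nil, pvAltRec, add_zero]
    congr 1
    apply List.map_congr_left
    intro e _
    show (if e.1 == "on" then (1 : Int) else -1) * totalCubes e.2 = pvSign e.1 * uncovered e.2 []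
    rw [show uncovered e.2 [] = volB e.2 from rfl, pvVolB_eq, pvSign]
  | cons step L ih =>
    intro R
    simp only [List.foldl_cons]
    rw [pvFoldA_eq R step, ih (pvStepA R step.1 step.2)]
    unfold pvStepA
    rw [List.map_append, List.sum_append, List.map_append, List.sum_append]
    obtain ⟨st, cub⟩ := step
    rw [pvFlips_sum cub R L]
    have hhead : ((if st == "on" then [(st, cub)] else []).map
        fun e => pvSign e.1 * uncovered e.2 L).sum
        = (if st == "on" then uncovered cub L else 0) := by
      by_cases hst : st = "on"
      · subst hst; simp [pvSign]
      · have hb : (st == "on") = false := by simpa using hst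
        simp [hb]
    rw [hhead]
    have hR : (R.map fun e => pvSign e.1 * uncovered e.2 L).sum
        + (R.map fun e => pvSign e.1 *
            -(match pvIk cub e.2 with | some i => uncovered i L | none => 0)).sum
        = (R.map fun e => pvSign e.1 * uncovered e.2 ((st, cub) :: L)).sum := by
      rw [← PySem.List.sum_map_add_int]
      apply congrArg
      apply List.map_congr_left
      intro e _
      rw [pvUncovered_cons e.2 (st, cub) L]
      ring
    rw [show pvAltRec ((st, cub) :: L)
        = (if st == "on" then uncovered cub L else 0) + pvAltRec L from rfl]
    rw [← hR]
    ring

-- B's enumerate/filter/map sum is the structural recursion pvAltRec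
lemma pvAlt_eq_rec (steps : List (String × List (Int × Int))) :
    part2_alt steps = pvAltRec steps := by
  unfold part2_alt
  suffices h : ∀ (L : List (String × List (Int × Int))) (pre : List (String × List (Int × Int))),
      (((PySem.List.enumerate L (pre.length : Int)).filter fun je => je.2.1 == "on").map
          fun je => uncovered je.2.2 ((pre ++ L).drop (je.1.toNat + 1))).sum = pvAltRec L by
    simpa using h steps []
  intro L
  induction L with
  | nil => intro pre; simp [pvAltRec]
  | cons step L ih =>
    intro pre
    obtain ⟨st, c⟩ := step
    rw [PySem.List.enumerate_cons]
    have hdrop : (pre ++ (st, c) :: L).drop (((pre.length : Int)).toNat + 1) = L := by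
      simp
    have hstep : ∀ je ∈ (PySem.List.enumerate L ((pre.length : Int) + 1)).filter
        (fun je => je.2.1 == "on"),
        uncovered je.2.2 ((pre ++ (st, c) :: L).drop (je.1.toNat + 1))
          = uncovered je.2.2 (((pre ++ [(st, c)]) ++ L).drop (je.1.toNat + 1)) := by
      intro je _
      rw [List.append_assoc]
      simp
    by_cases h : st == "on"
    · rw [List.filter_cons_of_pos (by simpa using h), List.map_cons, List.sum_cons]
      simp only [hdrop]
      have := ih (pre ++ [(st, c)])
      rw [List.map_congr_left hstep]
      simp only [List.length_append, List.length_cons, List.length_nil] at this ⊢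
      rw [show ((pre.length : Int) + 1) = ((pre.length + 1 : Nat) : Int) by push_cast; ring]
      rw [show (pre.length + (0 + 1) : Nat) = pre.length + 1 from by omega] at this
      rw [this]
      simp [pvAltRec, h]
    · rw [List.filter_cons_of_neg (by simpa using h)]
      have := ih (pre ++ [(st, c)])
      rw [List.map_congr_left hstep]
      simp only [List.length_append, List.length_cons, List.length_nil] at this ⊢
      rw [show ((pre.length : Int) + 1) = ((pre.length + 1 : Nat) : Int) by push_cast; ring]
      rw [show (pre.length + (0 + 1) : Nat) = pre.length + 1 from by omega] at this
      rw [this]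
      simp [pvAltRec, h]

-- ===== VERDICT (by name: the statement is the Claim_ definition above) =====
theorem part2_spec : Claim_equal_part2 := by
  intro steps _
  unfold Spec_part2 part2
  rw [pvAlt_eq_rec]
  simpa using pvMain steps []
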